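-- pv_equiv track=rewrite | github.com/y-f-li/AI-Movie-Recommender | webapp/app.py | _build_visible_tokens_with_mapping
-- ===== SOURCE A (Python) =====
-- def _build_visible_tokens_with_mapping(original_tokens: list[str], consumed_mask: list[bool], placeholder: str) -> tuple[list[str], dict[int, int]]:
--     visible_tokens: list[str] = []
--     original_to_visible: dict[int, int] = {}
--     idx = 0
--     while idx < len(original_tokens):
--         if consumed_mask[idx]:
--             visible_tokens.append(placeholder)
--             while idx < len(original_tokens) and consumed_mask[idx]:
--                 idx += 1
--         else:
--             original_to_visible[idx] = len(visible_tokens)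
--             visible_tokens.append(original_tokens[idx])
--             idx += 1
--     return visible_tokens, original_to_visible
-- ===== SOURCE B (Python) =====
-- def _build_visible_tokens_with_mapping(original_tokens: list[str], consumed_mask: list[bool], placeholder: str) -> tuple[list[str], dict[int, int]]:
--     # Staged, index-arithmetic formulation: instead of A's single emit loop with
--     # run-skipping, first classify which indices EMIT a visible slot (an index
--     # emits iff it is unconsumed or it starts a maximal consumed run), then read
--     # every visible position off the prefix sums of that emit table.
--     n = len(original_tokens)
--     emits = [(not consumed_mask[i]) or i == 0 or (not consumed_mask[i - 1]) for i in range(n)]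
--     visible_tokens = [placeholder if consumed_mask[i] else original_tokens[i] for i in range(n) if emits[i]]
--     prefix = []
--     count = 0
--     for e in emits:
--         prefix.append(count)
--         count += e
--     original_to_visible = {i: prefix[i] for i in range(n) if not consumed_mask[i]}
--     return visible_tokens, original_to_visible
-- ===== Notes on version B (the rewrite author's own statement) =====
-- stated objective: alternative
-- what changed: Replaces A's stateful emit loop with nested run-skipping whiles by a staged formulation: a per-index emit table (unconsumed or run start), a filtered comprehension for the visible tokens, and prefix sums of the emit table giving every visible position.
import Mathlib
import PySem

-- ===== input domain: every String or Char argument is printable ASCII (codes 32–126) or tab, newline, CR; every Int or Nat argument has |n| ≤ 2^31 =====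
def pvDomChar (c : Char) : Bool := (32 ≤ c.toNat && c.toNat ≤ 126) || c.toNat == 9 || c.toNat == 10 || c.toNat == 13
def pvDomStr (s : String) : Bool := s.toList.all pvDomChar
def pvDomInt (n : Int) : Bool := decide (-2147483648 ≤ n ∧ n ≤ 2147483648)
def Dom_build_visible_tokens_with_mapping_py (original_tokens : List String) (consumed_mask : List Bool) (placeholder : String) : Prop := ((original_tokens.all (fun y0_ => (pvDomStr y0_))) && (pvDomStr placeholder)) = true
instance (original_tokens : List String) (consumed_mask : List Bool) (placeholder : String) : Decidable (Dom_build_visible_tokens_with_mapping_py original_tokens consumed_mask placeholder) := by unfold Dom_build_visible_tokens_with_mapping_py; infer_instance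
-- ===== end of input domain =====

-- B replaces A's stateful emit loop (nested run-skipping whiles) by a staged
-- formulation: an emit table, a filtered comprehension, and prefix sums of the
-- emit table for the visible positions (objective: alternative).
-- The Python dict is ported as an association list in insertion order; both
-- programs assign each key (a strictly increasing index) exactly once.

-- ===== PORT A =====
-- inner 'while idx < len(original_tokens) and consumed_mask[idx]: idx += 1'
def pvSkip (mask : List Bool) (n idx : Nat) : Nat :=
  if h : idx < n ∧ mask.getD idx false = true then pvSkip mask n (idx + 1) else idx
termination_by n - idx
decreasing_by omega

-- termination fact cited by pvALoop: the skip never moves backwards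
theorem pvSkip_ge (mask : List Bool) (n idx : Nat) : idx ≤ pvSkip mask n idx := by
  fun_induction pvSkip mask n idx with
  | case1 idx h ih => omega
  | case2 idx h => omega

-- outer while loop of A, state = (idx, visible_tokens, original_to_visible)
def pvALoop (toks : List String) (mask : List Bool) (ph : String) (idx : Nat)
    (vis : List String) (m : List (Int × Int)) : List String × (List (Int × Int)) :=
  if h : idx < toks.length then
    if hc : mask.getD idx false = true then
      pvALoop toks mask ph (pvSkip mask toks.length idx) (vis ++ [ph]) m
    else
      pvALoop toks mask ph (idx + 1) (vis ++ [toks.getD idx ""])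
        (m ++ [((idx : Int), (vis.length : Int))])
  else (vis, m)
termination_by toks.length - idx
decreasing_by
  · have h1 : idx + 1 ≤ pvSkip mask toks.length (idx + 1) := pvSkip_ge mask toks.length (idx + 1)
    have h2 : pvSkip mask toks.length idx = pvSkip mask toks.length (idx + 1) := by
      rw [pvSkip, dif_pos (⟨h, hc⟩ : idx < toks.length ∧ mask.getD idx false = true)]
    omega
  · omega

def build_visible_tokens_with_mapping_py (original_tokens : List String) (consumed_mask : List Bool) (placeholder : String) : List String × (List (Int × Int)) :=
  pvALoop original_tokens consumed_mask placeholder 0 [] []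

-- ===== PORT B =====
-- '(not consumed_mask[i]) or i == 0 or (not consumed_mask[i - 1])'
def pvEmit (mask : List Bool) (i : Nat) : Bool :=
  (!(mask.getD i false)) || (i == 0) || (!(mask.getD (i - 1) false))

def build_visible_tokens_with_mapping_py_alt (original_tokens : List String) (consumed_mask : List Bool) (placeholder : String) : List String × (List (Int × Int)) :=
  let n := original_tokens.length
  let emits := (List.range n).map (pvEmit consumed_mask)
  let visible := ((List.range n).filter (fun i => emits.getD i false)).map
    (fun i => if consumed_mask.getD i false then placeholder else original_tokens.getD i "")
  let prefixes := (emits.foldl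
    (fun (st : List Int × Int) e => (st.1 ++ [st.2], st.2 + if e then 1 else 0)) ([], 0)).1
  let m := ((List.range n).filter (fun i => !(consumed_mask.getD i false))).map
    (fun (i : Nat) => ((i : Int), prefixes.getD i 0))
  (visible, m)

-- ===== PRECONDITION & SPEC =====
-- A evaluates consumed_mask[idx] for every idx < len(original_tokens), so it raises
-- IndexError exactly when the mask is shorter than the token list; those inputs are excluded.
def Pre_build_visible_tokens_with_mapping_py (original_tokens : List String) (consumed_mask : List Bool) (placeholder : String) : Prop :=
  original_tokens.length ≤ consumed_mask.length
instance (original_tokens : List String) (consumed_mask : List Bool) (placeholder : String) : Decidable (Pre_build_visible_tokens_with_mapping_py original_tokens consumed_mask placeholder) := by unfold Pre_build_visible_tokens_with_mapping_py; infer_instance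

def pvWitness_build_visible_tokens_with_mapping_py : List String × List Bool × String :=
  (["a", "b", "c"], [false, true, true], "_")

def Spec_build_visible_tokens_with_mapping_py (original_tokens : List String) (consumed_mask : List Bool) (placeholder : String) (out : List String × (List (Int × Int))) : Prop := out = build_visible_tokens_with_mapping_py_alt original_tokens consumed_mask placeholder
instance (original_tokens : List String) (consumed_mask : List Bool) (placeholder : String) (out : List String × (List (Int × Int))) : Decidable (Spec_build_visible_tokens_with_mapping_py original_tokens consumed_mask placeholder out) := by unfold Spec_build_visible_tokens_with_mapping_py; infer_instance

-- ===== CLAIM (what is proved, stated in full; the proofs are below) =====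
def Claim_equal_build_visible_tokens_with_mapping_py : Prop := ∀ (original_tokens : List String) (consumed_mask : List Bool) (placeholder : String), Dom_build_visible_tokens_with_mapping_py original_tokens consumed_mask placeholder → Pre_build_visible_tokens_with_mapping_py original_tokens consumed_mask placeholder → Spec_build_visible_tokens_with_mapping_py original_tokens consumed_mask placeholder (build_visible_tokens_with_mapping_py original_tokens consumed_mask placeholder)

-- ===== LEMMAS AND PROOFS =====

-- visible tokens contributed by indices ≥ idx
def pvVisFrom (toks : List String) (mask : List Bool) (ph : String) (idx : Nat) : List String :=
  ((List.range' idx (toks.length - idx)).filter (pvEmit mask)).map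
    (fun i => if mask.getD i false then ph else toks.getD i "")

-- mapping entries contributed by indices ≥ idx; the visible position of an
-- unconsumed index i is the number of emitting indices below i
def pvMFrom (mask : List Bool) (n idx : Nat) : List (Int × Int) :=
  ((List.range' idx (n - idx)).filter (fun i => !(mask.getD i false))).map
    (fun (i : Nat) => ((i : Int), ((List.range i).countP (pvEmit mask) : Int)))

theorem pvSkip_le (mask : List Bool) (n idx : Nat) (h : idx ≤ n) : pvSkip mask n idx ≤ n := by
  fun_induction pvSkip mask n idx with
  | case1 idx hc ih => exact ih (by omega)
  | case2 idx hc => exact h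

theorem pvSkip_post (mask : List Bool) (n idx : Nat) (h : pvSkip mask n idx < n) :
    mask.getD (pvSkip mask n idx) false = false := by
  fun_induction pvSkip mask n idx with
  | case1 idx hc ih => exact ih h
  | case2 idx hc =>
    rcases Decidable.not_and_iff_not_or_not.mp hc with h1 | h2
    · omega
    · simpa using h2

-- every index inside the skipped run is consumed
theorem pvSkip_inrun (mask : List Bool) (n idx : Nat) :
    ∀ j, idx ≤ j → j < pvSkip mask n idx → mask.getD j false = true := by
  fun_induction pvSkip mask n idx with
  | case1 idx hc ih =>
    intro j hj1 hj2
    rcases Nat.eq_or_lt_of_le hj1 with rfl | h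
    · exact hc.2
    · exact ih j h hj2
  | case2 idx hc =>
    intro j hj1 hj2; omega

-- inside a consumed run, past its start, nothing emits
theorem pvEmit_inrun_false (mask : List Bool) (n idx : Nat) (j : Nat)
    (h1 : idx + 1 ≤ j) (h2 : j < pvSkip mask n idx) : pvEmit mask j = false := by
  have hj : mask.getD j false = true := pvSkip_inrun mask n idx j (by omega) h2
  have hj1 : mask.getD (j - 1) false = true :=
    pvSkip_inrun mask n idx (j - 1) (by omega) (by omega)
  have hj0 : j ≠ 0 := by omega
  unfold pvEmit
  rw [hj, hj1]
  simp [hj0]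

-- the filter of a skipped run reduces to its start (on the emit predicate)…
theorem pvRun_filter_emit (mask : List Bool) (n idx : Nat)
    (hidx : idx < n) (hc : mask.getD idx false = true) (hS : pvEmit mask idx = true) :
    (List.range' idx (pvSkip mask n idx - idx)).filter (pvEmit mask) = [idx] := by
  have hgt : idx < pvSkip mask n idx := by
    have h2 : pvSkip mask n idx = pvSkip mask n (idx + 1) := by
      rw [pvSkip, dif_pos ⟨hidx, hc⟩]
    have := pvSkip_ge mask n (idx + 1); omega
  have hdecomp : List.range' idx (pvSkip mask n idx - idx)
      = idx :: List.range' (idx + 1) (pvSkip mask n idx - (idx + 1)) := by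
    rw [show pvSkip mask n idx - idx = (pvSkip mask n idx - (idx + 1)) + 1 from by omega,
      List.range'_succ]
  rw [hdecomp, List.filter_cons_of_pos hS]
  congr 1
  rw [List.filter_eq_nil_iff]
  intro j hj
  have hj' := List.mem_range'_1.mp hj
  simp [pvEmit_inrun_false mask n idx j hj'.1 (by omega)]

-- …and to nothing on the unconsumed predicate
theorem pvRun_filter_unc (mask : List Bool) (n idx : Nat) :
    (List.range' idx (pvSkip mask n idx - idx)).filter (fun i => !(mask.getD i false)) = [] := by
  rw [List.filter_eq_nil_iff]
  intro j hj
  have hj' := List.mem_range'_1.mp hj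
  have := pvSkip_inrun mask n idx j hj'.1 (by omega)
  simp [List.getD_eq_getElem?_getD] at this
  simp [this]

-- splitting countP over range at a cut point
theorem pvCount_split (mask : List Bool) (a b : Nat) (h : a ≤ b) :
    (List.range b).countP (pvEmit mask)
      = (List.range a).countP (pvEmit mask) + (List.range' a (b - a)).countP (pvEmit mask) := by
  have h1 := List.range'_append_1 (s := 0) (m := a) (n := b - a)
  rw [Nat.zero_add, show a + (b - a) = b from by omega] at h1
  rw [List.range_eq_range', List.range_eq_range', ← h1, List.countP_append]

-- crossing a skipped run adds exactly one emitting index (its start)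
theorem pvCount_run (mask : List Bool) (n idx : Nat)
    (hidx : idx < n) (hc : mask.getD idx false = true) (hS : pvEmit mask idx = true) :
    (List.range (pvSkip mask n idx)).countP (pvEmit mask)
      = (List.range idx).countP (pvEmit mask) + 1 := by
  have hge := pvSkip_ge mask n idx
  have hrun : (List.range' idx (pvSkip mask n idx - idx)).countP (pvEmit mask) = 1 := by
    rw [List.countP_eq_length_filter, pvRun_filter_emit mask n idx hidx hc hS]
    rfl
  rw [pvCount_split mask idx (pvSkip mask n idx) hge, hrun]

-- main invariant: A's loop from index idx, given that a consumed idx must emit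
-- (be a run start) and that vis holds one slot per emitting index below idx,
-- produces exactly B's staged suffix lists
theorem pvMainB (toks : List String) (mask : List Bool) (ph : String) :
    ∀ (idx : Nat) (vis : List String) (m : List (Int × Int)),
    (idx < toks.length → mask.getD idx false = true → pvEmit mask idx = true) →
    vis.length = (List.range idx).countP (pvEmit mask) →
    pvALoop toks mask ph idx vis m = (vis ++ pvVisFrom toks mask ph idx, m ++ pvMFrom mask toks.length idx) := by
  intro idx vis m
  induction idx, vis, m using pvALoop.induct toks mask ph with
  | case1 idx vis m h hc ih =>
    intro hS hlen
    have hE : pvEmit mask idx = true := hS h hc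
    have hge := pvSkip_ge mask toks.length idx
    have hle : pvSkip mask toks.length idx ≤ toks.length :=
      pvSkip_le mask toks.length idx (by omega)
    have hcr := pvCount_run mask toks.length idx h hc hE
    have hdecomp : List.range' idx (toks.length - idx)
        = List.range' idx (pvSkip mask toks.length idx - idx)
          ++ List.range' (pvSkip mask toks.length idx) (toks.length - pvSkip mask toks.length idx) := by
      have h1 := List.range'_append_1 (s := idx) (m := pvSkip mask toks.length idx - idx)
        (n := toks.length - pvSkip mask toks.length idx)
      rw [show idx + (pvSkip mask toks.length idx - idx) = pvSkip mask toks.length idx from by omega,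
        show pvSkip mask toks.length idx - idx + (toks.length - pvSkip mask toks.length idx)
          = toks.length - idx from by omega] at h1
      exact h1.symm
    rw [pvALoop, dif_pos h, dif_pos hc]
    rw [ih ?_ ?_]
    · have hv : pvVisFrom toks mask ph idx
          = ph :: pvVisFrom toks mask ph (pvSkip mask toks.length idx) := by
        unfold pvVisFrom
        rw [hdecomp, List.filter_append, List.map_append,
          pvRun_filter_emit mask toks.length idx h hc hE]
        have hc' : mask[idx]?.getD false = true := by
          simpa [List.getD_eq_getElem?_getD] using hc
        simp [hc']
      have hm : pvMFrom mask toks.length idx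
          = pvMFrom mask toks.length (pvSkip mask toks.length idx) := by
        unfold pvMFrom
        rw [hdecomp, List.filter_append, List.map_append, pvRun_filter_unc mask toks.length idx]
        simp
      rw [hv, hm]
      simp
    · intro hlt hmt
      have := pvSkip_post mask toks.length idx hlt
      rw [hmt] at this
      simp at this
    · simp [hlen, hcr]
  | case2 idx vis m h hc ih =>
    intro hS hlen
    have hcf : mask.getD idx false = false := (Bool.not_eq_true _).mp hc
    have hc' : mask[idx]?.getD false = false := by
      simpa [List.getD_eq_getElem?_getD] using hcf
    have hE : pvEmit mask idx = true := by
      unfold pvEmit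
      rw [hcf]
      simp
    have hdecomp : List.range' idx (toks.length - idx)
        = idx :: List.range' (idx + 1) (toks.length - (idx + 1)) := by
      rw [show toks.length - idx = (toks.length - (idx + 1)) + 1 from by omega, List.range'_succ]
    rw [pvALoop, dif_pos h, dif_neg hc]
    rw [ih ?_ ?_]
    · have hv : pvVisFrom toks mask ph idx
          = toks.getD idx "" :: pvVisFrom toks mask ph (idx + 1) := by
        unfold pvVisFrom
        rw [hdecomp, List.filter_cons_of_pos hE, List.map_cons]
        simp [hc']
      have hm : pvMFrom mask toks.length idx
          = ((idx : Int), ((List.range idx).countP (pvEmit mask) : Int))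
            :: pvMFrom mask toks.length (idx + 1) := by
        unfold pvMFrom
        rw [hdecomp, List.filter_cons_of_pos (by simp [hc']), List.map_cons]
      rw [hv, hm, hlen]
      simp
    · intro hlt hmt
      unfold pvEmit
      rw [show idx + 1 - 1 = idx from rfl, hcf]
      simp
    · simp [hlen, List.range_succ, List.countP_append, hE]
  | case3 idx vis m h =>
    intro hS hlen
    rw [pvALoop, dif_neg h]
    unfold pvVisFrom pvMFrom
    rw [show toks.length - idx = 0 from by omega]
    simp

-- the emit table is a map over range, so positional reads are pvEmit itself
theorem pvEmits_getD (mask : List Bool) (n i : Nat) (h : i < n) :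
    ((List.range n).map (pvEmit mask)).getD i false = pvEmit mask i := by
  have hlen : i < ((List.range n).map (pvEmit mask)).length := by simpa using h
  rw [List.getD_eq_getElem _ _ hlen]
  simp

-- the prefix-sum loop computes the emit counts below each index
theorem pvPrefix_eq (mask : List Bool) (n : Nat) :
    ((List.range n).map (pvEmit mask)).foldl
      (fun (st : List Int × Int) e => (st.1 ++ [st.2], st.2 + if e then 1 else 0)) ([], 0)
    = ((List.range n).map (fun i => (((List.range i).countP (pvEmit mask) : Nat) : Int)),
       (((List.range n).countP (pvEmit mask) : Nat) : Int)) := by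
  induction n with
  | zero => simp
  | succ k ih =>
    rw [List.range_succ, List.map_append, List.foldl_append, ih]
    simp [List.countP_append]

-- the whole-list suffix views coincide with B's staged lists
theorem pvVisFrom_zero (toks : List String) (mask : List Bool) (ph : String) :
    pvVisFrom toks mask ph 0
      = ((List.range toks.length).filter
          (fun i => ((List.range toks.length).map (pvEmit mask)).getD i false)).map
          (fun i => if mask.getD i false then ph else toks.getD i "") := by
  unfold pvVisFrom
  rw [Nat.sub_zero, ← List.range_eq_range']
  congr 1
  refine (List.filter_congr ?_).symm
  intro i hi
  exact pvEmits_getD mask toks.length i (List.mem_range.mp hi)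

theorem pvMFrom_zero (mask : List Bool) (n : Nat) :
    pvMFrom mask n 0
      = ((List.range n).filter (fun i => !(mask.getD i false))).map
          (fun (i : Nat) => ((i : Int),
            ((List.range n).map
              (fun j => (((List.range j).countP (pvEmit mask) : Nat) : Int))).getD i 0)) := by
  unfold pvMFrom
  rw [Nat.sub_zero, ← List.range_eq_range']
  refine (List.map_congr_left ?_).symm
  intro i hi
  have hlt : i < n := List.mem_range.mp (List.mem_filter.mp hi).1
  have hlen : i < ((List.range n).map
      (fun j => (((List.range j).countP (pvEmit mask) : Nat) : Int))).length := by simpa using hlt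
  rw [List.getD_eq_getElem _ _ hlen]
  simp

-- ===== VERDICT (by name: the statement is the Claim_ definition above) =====
theorem build_visible_tokens_with_mapping_py_spec : Claim_equal_build_visible_tokens_with_mapping_py := by
  intro toks mask ph _ _
  unfold Spec_build_visible_tokens_with_mapping_py build_visible_tokens_with_mapping_py
  rw [pvMainB toks mask ph 0 [] [] (by intro _ h; unfold pvEmit; rw [h]; simp) (by simp)]
  unfold build_visible_tokens_with_mapping_py_alt
  simp only [List.nil_append, pvPrefix_eq, pvVisFrom_zero, pvMFrom_zero]
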